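-- pv_equiv track=rewrite | github.com/lewisawe/silver-succotash | utils/voice_processor_us_east_1.py | _format_for_speech
-- ===== SOURCE A (Python) =====
-- def _format_for_speech(text: str) -> str:
--     """Format text for better speech synthesis"""
--     text = text.replace(". ", ". ... ")
--     text = text.replace("? ", "? ... ")
--     text = text.replace(": ", ": ... ")
--
--     replacements = {
--         "API": "A P I",
--         "REST": "R E S T",
--         "JSON": "J S O N",
--         "SQL": "S Q L",
--         "AWS": "A W S"
--     }
--
--     for term, pronunciation in replacements.items():
--         text = text.replace(term, pronunciation)
--
--     return text
-- ===== SOURCE B (Python) =====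
-- # One left-to-right scan over the text: at each position the first matching
-- # key of the (ordered) table is emitted as its expansion, instead of A's
-- # eight separate full-text .replace passes.
-- _TABLE = [
--     (". ", ". ... "),
--     ("? ", "? ... "),
--     (": ", ": ... "),
--     ("API", "A P I"),
--     ("REST", "R E S T"),
--     ("JSON", "J S O N"),
--     ("SQL", "S Q L"),
--     ("AWS", "A W S"),
-- ]
--
-- def _format_for_speech(text: str) -> str:
--     out = []
--     i = 0
--     n = len(text)
--     while i < n:
--         for key, val in _TABLE:
--             if text.startswith(key, i):
--                 out.append(val)
--                 i += len(key)
--                 break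
--         else:
--             out.append(text[i])
--             i += 1
--     return "".join(out)
-- ===== Notes on version B (the rewrite author's own statement) =====
-- stated objective: alternative
-- what changed: B replaces A's eight sequential full-text .replace passes by a single left-to-right scan that dispatches each position through an ordered key table, emitting the expansion of the first matching key.
-- outside the precondition, e.g. on _format_for_speech('AWSQL'): A returns 'A W S Q L', B returns 'A W SQL'
import Mathlib
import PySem

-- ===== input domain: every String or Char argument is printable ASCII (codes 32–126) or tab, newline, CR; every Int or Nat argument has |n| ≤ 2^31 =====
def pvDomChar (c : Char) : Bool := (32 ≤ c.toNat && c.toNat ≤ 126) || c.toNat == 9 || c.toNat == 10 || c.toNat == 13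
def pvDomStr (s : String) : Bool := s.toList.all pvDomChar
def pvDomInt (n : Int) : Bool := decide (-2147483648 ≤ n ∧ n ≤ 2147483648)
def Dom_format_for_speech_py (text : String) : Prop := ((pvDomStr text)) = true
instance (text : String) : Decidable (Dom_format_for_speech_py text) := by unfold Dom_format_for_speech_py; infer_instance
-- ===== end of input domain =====

-- B replaces A's eight sequential full-text .replace passes by ONE left-to-right scan
-- dispatching through an ordered key table (objective: alternative single-pass algorithm).

-- ===== PORT A =====
def format_for_speech_py (text : String) : String :=
  let text := PySem.Str.replace text ". " ". ... "
  let text := PySem.Str.replace text "? " "? ... "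
  let text := PySem.Str.replace text ": " ": ... "
  let replacements : PySem.Dict String String :=
    ((((PySem.Dict.empty.insert "API" "A P I").insert "REST" "R E S T").insert
        "JSON" "J S O N").insert "SQL" "S Q L").insert "AWS" "A W S"
  replacements.items.foldl (fun t p => PySem.Str.replace t p.1 p.2) text

-- ===== PORT B =====
-- the ordered substitution table of Source B, as char lists
def pvTable : List (List Char × List Char) :=
  [ (['.', ' '], ['.', ' ', '.', '.', '.', ' ']),
    (['?', ' '], ['?', ' ', '.', '.', '.', ' ']),
    ([':', ' '], [':', ' ', '.', '.', '.', ' ']),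
    (['A', 'P', 'I'], ['A', ' ', 'P', ' ', 'I']),
    (['R', 'E', 'S', 'T'], ['R', ' ', 'E', ' ', 'S', ' ', 'T']),
    (['J', 'S', 'O', 'N'], ['J', ' ', 'S', ' ', 'O', ' ', 'N']),
    (['S', 'Q', 'L'], ['S', ' ', 'Q', ' ', 'L']),
    (['A', 'W', 'S'], ['A', ' ', 'W', ' ', 'S']) ]

-- Source B's while loop: at each position, emit the first matching key's expansion and skip
-- the key (i += len(key), here: drop (len-1) of the tail), else copy one character.
def pvScan (l : List Char) : List Char :=
  match l with
  | [] => []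
  | c :: t =>
    match pvTable.find? (fun p => p.1.isPrefixOf (c :: t)) with
    | some kv => kv.2 ++ pvScan (t.drop (kv.1.length - 1))
    | none => c :: pvScan t
termination_by l.length
decreasing_by
  · simp only [List.length_drop, List.length_cons]; omega
  · simp

def format_for_speech_py_alt (text : String) : String :=
  String.ofList (pvScan text.toList)

-- ===== PRECONDITION & SPEC =====
-- Pre_ excludes texts containing "AWSQL", the one place where two acronym keys of the
-- table overlap: there A's sequential passes expand both overlapping acronyms while B's
-- single scan expands only the first; both values are defensible and no one would
-- specify either.
def Pre_format_for_speech_py (text : String) : Prop :=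
  PySem.Str.isIn "AWSQL" text = false
instance (text : String) : Decidable (Pre_format_for_speech_py text) := by
  unfold Pre_format_for_speech_py; infer_instance

def pvWitness_format_for_speech_py : String := "Use the API: AWS and SQL. OK? "

def Spec_format_for_speech_py (text : String) (out : String) : Prop :=
  out = format_for_speech_py_alt text
instance (text : String) (out : String) : Decidable (Spec_format_for_speech_py text out) := by
  unfold Spec_format_for_speech_py; infer_instance

-- ===== CLAIM (what is proved, stated in full; the proofs are below) =====
def Claim_equal_format_for_speech_py : Prop :=
  ∀ (text : String), Dom_format_for_speech_py text → Pre_format_for_speech_py text →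
    Spec_format_for_speech_py text (format_for_speech_py text)

-- ===== LEMMAS AND PROOFS =====

-- the eight keys and values, as char lists
def K1 : List Char := ['.', ' ']
def V1 : List Char := ['.', ' ', '.', '.', '.', ' ']
def K2 : List Char := ['?', ' ']
def V2 : List Char := ['?', ' ', '.', '.', '.', ' ']
def K3 : List Char := [':', ' ']
def V3 : List Char := [':', ' ', '.', '.', '.', ' ']
def K4 : List Char := ['A', 'P', 'I']
def V4 : List Char := ['A', ' ', 'P', ' ', 'I']
def K5 : List Char := ['R', 'E', 'S', 'T']
def V5 : List Char := ['R', ' ', 'E', ' ', 'S', ' ', 'T']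
def K6 : List Char := ['J', 'S', 'O', 'N']
def V6 : List Char := ['J', ' ', 'S', ' ', 'O', ' ', 'N']
def K7 : List Char := ['S', 'Q', 'L']
def V7 : List Char := ['S', ' ', 'Q', ' ', 'L']
def K8 : List Char := ['A', 'W', 'S']
def V8 : List Char := ['A', ' ', 'W', ' ', 'S']

-- structural model of PySem.Chars.replace for a nonempty pattern
def rep1 (k v : List Char) : List Char → List Char
  | [] => []
  | c :: t =>
    if k.isPrefixOf (c :: t) then v ++ rep1 k v (t.drop (k.length - 1))
    else c :: rep1 k v t
termination_by l => l.length
decreasing_by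
  · simp only [List.length_drop, List.length_cons]; omega
  · simp

lemma rep1_nil (k v : List Char) : rep1 k v [] = [] := by simp [rep1]

lemma rep1_pos (k v : List Char) (c : Char) (t : List Char)
    (h : k.isPrefixOf (c :: t) = true) :
    rep1 k v (c :: t) = v ++ rep1 k v (t.drop (k.length - 1)) := by
  rw [rep1]; simp only [h]; simp

lemma rep1_neg (k v : List Char) (c : Char) (t : List Char)
    (h : k.isPrefixOf (c :: t) = false) :
    rep1 k v (c :: t) = c :: rep1 k v t := by
  rw [rep1]; simp only [h]; simp

lemma go_eq (k v : List Char) (hk : k ≠ []) :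
    ∀ (fuel : Nat) (l acc : List Char), l.length ≤ fuel →
      PySem.Chars.replace.go k v fuel l acc = acc.reverse ++ rep1 k v l := by
  intro fuel
  induction fuel with
  | zero =>
    intro l acc hl
    have : l = [] := List.length_eq_zero_iff.mp (Nat.le_zero.mp hl)
    subst this
    simp [PySem.Chars.replace.go, rep1_nil]
  | succ n ih =>
    intro l acc hl
    cases l with
    | nil => simp [PySem.Chars.replace.go, rep1_nil]
    | cons c t =>
      rw [PySem.Chars.replace.go]
      by_cases h : k.isPrefixOf (c :: t) = true
      · rw [if_pos h]
        obtain ⟨m, hm⟩ : ∃ m, k.length = m + 1 := by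
          cases k with
          | nil => exact absurd rfl hk
          | cons a k' => exact ⟨k'.length, rfl⟩
        have hdrop : List.drop k.length (c :: t) = t.drop (k.length - 1) := by
          rw [hm]; simp
        rw [hdrop, ih _ _ (by
          simp only [List.length_cons] at hl
          simp only [List.length_drop]; omega)]
        rw [rep1_pos k v c t h]
        simp
      · rw [if_neg h]
        rw [ih t (c :: acc) (by simp only [List.length_cons] at hl; omega)]
        rw [rep1_neg k v c t (Bool.eq_false_iff.mpr h)]
        simp

lemma replace_eq (s k v : List Char) (hk : k ≠ []) :
    PySem.Chars.replace s k v = rep1 k v s := by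
  unfold PySem.Chars.replace
  rw [if_neg (by simpa [List.isEmpty_iff] using hk)]
  simpa using go_eq k v hk s.length s [] le_rfl

lemma pref_resolve {k u X : List Char} (h : k <+: u ++ X) : k <+: u ∨ u <+: k :=
  List.prefix_or_prefix_of_prefix h (List.prefix_append u X)

lemma singleton_prefix {b : Char} {Z : List Char} : [b] <+: Z ↔ Z.head? = some b := by
  cases Z with
  | nil => simp
  | cons z Z' => simp [List.cons_prefix_cons, eq_comm]

lemma head?_of_prefix_cons {a : Char} {l Z : List Char} (h : (a :: l) <+: Z) :
    Z.head? = some a := by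
  cases Z with
  | nil => simp at h
  | cons z Z' =>
    rcases List.cons_prefix_cons.mp h with ⟨rfl, -⟩; rfl

lemma head?_key_of_prefix {k : List Char} {c : Char} {t : List Char}
    (hk : k ≠ []) (h : k <+: c :: t) : k.head? = some c := by
  cases k with
  | nil => exact absurd rfl hk
  | cons a k' => rcases List.cons_prefix_cons.mp h with ⟨rfl, -⟩; rfl

lemma head?_rep1 (k v : List Char) (hk : k ≠ []) (hv : v ≠ [])
    (hh : v.head? = k.head?) (u : List Char) :
    (rep1 k v u).head? = u.head? := by
  cases u with
  | nil => simp [rep1_nil]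
  | cons c t =>
    by_cases h : k.isPrefixOf (c :: t) = true
    · rw [rep1_pos k v c t h, List.head?_append_of_ne_nil v hv, hh,
        head?_key_of_prefix hk (List.isPrefixOf_iff_prefix.mp h)]
      rfl
    · rw [rep1_neg k v c t (Bool.eq_false_iff.mpr h)]; rfl

lemma rep1_cons_ne (k v : List Char) (c : Char) (u : List Char)
    (hk : k ≠ []) (h : k.head? ≠ some c) :
    rep1 k v (c :: u) = c :: rep1 k v u := by
  apply rep1_neg
  rw [Bool.eq_false_iff]
  intro hp
  exact h (head?_key_of_prefix hk (List.isPrefixOf_iff_prefix.mp hp))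

lemma rep1_append (k v : List Char) (_hk : k ≠ []) (w : List Char)
    (hcond : ∀ u ∈ w.tails, u = [] ∨ (¬ k <+: u ∧ ¬ u <+: k)) :
    ∀ X, rep1 k v (w ++ X) = w ++ rep1 k v X := by
  induction w with
  | nil => intro X; simp
  | cons c w' ih =>
    intro X
    rcases hcond (c :: w') ((List.mem_tails _ _).mpr List.suffix_rfl) with h | ⟨h1, h2⟩
    · simp at h
    · have hnp : k.isPrefixOf (c :: (w' ++ X)) = false := by
        rw [Bool.eq_false_iff]
        intro hp
        rcases pref_resolve (show k <+: (c :: w') ++ X from List.isPrefixOf_iff_prefix.mp hp) with h' | h'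
        · exact h1 h'
        · exact h2 h'
      rw [show (c :: w') ++ X = c :: (w' ++ X) from rfl, rep1_neg k v _ _ hnp,
        ih (fun u hu => hcond u ((List.mem_tails _ _).mpr
          (((List.mem_tails _ _).mp hu).trans (List.suffix_cons c w'))))]
      rfl

-- the first i passes of A, composed
def ch1 (s : List Char) : List Char := rep1 K1 V1 s
def ch2 (s : List Char) : List Char := rep1 K2 V2 (ch1 s)
def ch3 (s : List Char) : List Char := rep1 K3 V3 (ch2 s)
def ch4 (s : List Char) : List Char := rep1 K4 V4 (ch3 s)
def ch5 (s : List Char) : List Char := rep1 K5 V5 (ch4 s)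
def ch6 (s : List Char) : List Char := rep1 K6 V6 (ch5 s)
def ch7 (s : List Char) : List Char := rep1 K7 V7 (ch6 s)
def chain (s : List Char) : List Char := rep1 K8 V8 (ch7 s)

lemma head?_ch1 (t : List Char) : (ch1 t).head? = t.head? :=
  head?_rep1 K1 V1 (by decide) (by decide) (by decide) t
lemma head?_ch2 (t : List Char) : (ch2 t).head? = t.head? := by
  rw [ch2, head?_rep1 K2 V2 (by decide) (by decide) (by decide), head?_ch1]
lemma head?_ch3 (t : List Char) : (ch3 t).head? = t.head? := by
  rw [ch3, head?_rep1 K3 V3 (by decide) (by decide) (by decide), head?_ch2]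
lemma head?_ch4 (t : List Char) : (ch4 t).head? = t.head? := by
  rw [ch4, head?_rep1 K4 V4 (by decide) (by decide) (by decide), head?_ch3]
lemma head?_ch5 (t : List Char) : (ch5 t).head? = t.head? := by
  rw [ch5, head?_rep1 K5 V5 (by decide) (by decide) (by decide), head?_ch4]
lemma head?_ch6 (t : List Char) : (ch6 t).head? = t.head? := by
  rw [ch6, head?_rep1 K6 V6 (by decide) (by decide) (by decide), head?_ch5]
lemma head?_ch7 (t : List Char) : (ch7 t).head? = t.head? := by
  rw [ch7, head?_rep1 K7 V7 (by decide) (by decide) (by decide), head?_ch6]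

-- peeling one char whose value is not the first char of the first i keys
lemma ch3_cons (c : Char) (u : List Char)
    (h1 : c ≠ '.') (h2 : c ≠ '?') (h3 : c ≠ ':') :
    ch3 (c :: u) = c :: ch3 u := by
  rw [ch3, ch2, ch1,
    rep1_cons_ne K1 V1 c u (by decide) (by simp [K1]; exact fun e => h1 e.symm),
    rep1_cons_ne K2 V2 c _ (by decide) (by simp [K2]; exact fun e => h2 e.symm),
    rep1_cons_ne K3 V3 c _ (by decide) (by simp [K3]; exact fun e => h3 e.symm)]
  rfl

lemma ch4_cons (c : Char) (u : List Char)
    (h1 : c ≠ '.') (h2 : c ≠ '?') (h3 : c ≠ ':') (h4 : c ≠ 'A') :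
    ch4 (c :: u) = c :: ch4 u := by
  rw [ch4, ch3_cons c u h1 h2 h3,
    rep1_cons_ne K4 V4 c _ (by decide) (by simp [K4]; exact fun e => h4 e.symm)]
  rfl

lemma ch5_cons (c : Char) (u : List Char)
    (h1 : c ≠ '.') (h2 : c ≠ '?') (h3 : c ≠ ':') (h4 : c ≠ 'A') (h5 : c ≠ 'R') :
    ch5 (c :: u) = c :: ch5 u := by
  rw [ch5, ch4_cons c u h1 h2 h3 h4,
    rep1_cons_ne K5 V5 c _ (by decide) (by simp [K5]; exact fun e => h5 e.symm)]
  rfl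

lemma ch6_cons (c : Char) (u : List Char)
    (h1 : c ≠ '.') (h2 : c ≠ '?') (h3 : c ≠ ':') (h4 : c ≠ 'A') (h5 : c ≠ 'R')
    (h6 : c ≠ 'J') :
    ch6 (c :: u) = c :: ch6 u := by
  rw [ch6, ch5_cons c u h1 h2 h3 h4 h5,
    rep1_cons_ne K6 V6 c _ (by decide) (by simp [K6]; exact fun e => h6 e.symm)]
  rfl

lemma ch7_cons (c : Char) (u : List Char)
    (h1 : c ≠ '.') (h2 : c ≠ '?') (h3 : c ≠ ':') (h4 : c ≠ 'A') (h5 : c ≠ 'R')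
    (h6 : c ≠ 'J') (h7 : c ≠ 'S') :
    ch7 (c :: u) = c :: ch7 u := by
  rw [ch7, ch6_cons c u h1 h2 h3 h4 h5 h6,
    rep1_cons_ne K7 V7 c _ (by decide) (by simp [K7]; exact fun e => h7 e.symm)]
  rfl

-- head?-based extraction: a cons form from head? = some
lemma eq_cons_of_head? {Z : List Char} {a : Char} (h : Z.head? = some a) :
    ∃ Z', Z = a :: Z' := by
  cases Z with
  | nil => simp at h
  | cons z Z' =>
    simp only [List.head?_cons, Option.some.injEq] at h
    exact ⟨Z', by rw [h]⟩

lemma npb {k : List Char} {c : Char} {t : List Char} (h : ¬ k <+: c :: t) :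
    k.isPrefixOf (c :: t) = false :=
  Bool.eq_false_iff.mpr (fun hb => h (List.isPrefixOf_iff_prefix.mp hb))

-- no-new-front-match lemmas: if K_i does not match at the front of c :: t, it does
-- not match at the front of c :: (first i-1 passes of t) either
lemma noPre2 (c : Char) (t : List Char) (h : ¬ K2 <+: c :: t) :
    ¬ K2 <+: c :: ch1 t := by
  intro hp
  rcases List.cons_prefix_cons.mp hp with ⟨rfl, hp'⟩
  rw [singleton_prefix, head?_ch1, ← singleton_prefix] at hp'
  exact h (List.cons_prefix_cons.mpr ⟨rfl, hp'⟩)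

lemma noPre3 (c : Char) (t : List Char) (h : ¬ K3 <+: c :: t) :
    ¬ K3 <+: c :: ch2 t := by
  intro hp
  rcases List.cons_prefix_cons.mp hp with ⟨rfl, hp'⟩
  rw [singleton_prefix, head?_ch2, ← singleton_prefix] at hp'
  exact h (List.cons_prefix_cons.mpr ⟨rfl, hp'⟩)

lemma noPre4 (c : Char) (t : List Char) (h : ¬ K4 <+: c :: t) :
    ¬ K4 <+: c :: ch3 t := by
  intro hp
  rcases List.cons_prefix_cons.mp hp with ⟨rfl, hp'⟩
  have hP : t.head? = some 'P' := by
    rw [← head?_ch3]; exact head?_of_prefix_cons hp'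
  obtain ⟨t2, rfl⟩ := eq_cons_of_head? hP
  rw [ch3_cons 'P' t2 (by decide) (by decide) (by decide)] at hp'
  rcases List.cons_prefix_cons.mp hp' with ⟨-, hp''⟩
  rw [singleton_prefix, head?_ch3] at hp''
  obtain ⟨t3, rfl⟩ := eq_cons_of_head? hp''
  exact h (by simp [K4, List.cons_prefix_cons])

lemma noPre5 (c : Char) (t : List Char) (h : ¬ K5 <+: c :: t) :
    ¬ K5 <+: c :: ch4 t := by
  intro hp
  rcases List.cons_prefix_cons.mp hp with ⟨rfl, hp'⟩
  have hE : t.head? = some 'E' := by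
    rw [← head?_ch4]; exact head?_of_prefix_cons hp'
  obtain ⟨t2, rfl⟩ := eq_cons_of_head? hE
  rw [ch4_cons 'E' t2 (by decide) (by decide) (by decide) (by decide)] at hp'
  rcases List.cons_prefix_cons.mp hp' with ⟨-, hp''⟩
  have hS : t2.head? = some 'S' := by
    rw [← head?_ch4]; exact head?_of_prefix_cons hp''
  obtain ⟨t3, rfl⟩ := eq_cons_of_head? hS
  rw [ch4_cons 'S' t3 (by decide) (by decide) (by decide) (by decide)] at hp''
  rcases List.cons_prefix_cons.mp hp'' with ⟨-, hp3⟩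
  rw [singleton_prefix, head?_ch4] at hp3
  obtain ⟨t4, rfl⟩ := eq_cons_of_head? hp3
  exact h (by simp [K5, List.cons_prefix_cons])

lemma noPre6 (c : Char) (t : List Char) (h : ¬ K6 <+: c :: t) :
    ¬ K6 <+: c :: ch5 t := by
  intro hp
  rcases List.cons_prefix_cons.mp hp with ⟨rfl, hp'⟩
  have hS : t.head? = some 'S' := by
    rw [← head?_ch5]; exact head?_of_prefix_cons hp'
  obtain ⟨t2, rfl⟩ := eq_cons_of_head? hS
  rw [ch5_cons 'S' t2 (by decide) (by decide) (by decide) (by decide) (by decide)] at hp'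
  rcases List.cons_prefix_cons.mp hp' with ⟨-, hp''⟩
  have hO : t2.head? = some 'O' := by
    rw [← head?_ch5]; exact head?_of_prefix_cons hp''
  obtain ⟨t3, rfl⟩ := eq_cons_of_head? hO
  rw [ch5_cons 'O' t3 (by decide) (by decide) (by decide) (by decide) (by decide)] at hp''
  rcases List.cons_prefix_cons.mp hp'' with ⟨-, hp3⟩
  rw [singleton_prefix, head?_ch5] at hp3
  obtain ⟨t4, rfl⟩ := eq_cons_of_head? hp3
  exact h (by simp [K6, List.cons_prefix_cons])

lemma noPre7 (c : Char) (t : List Char) (h : ¬ K7 <+: c :: t) :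
    ¬ K7 <+: c :: ch6 t := by
  intro hp
  rcases List.cons_prefix_cons.mp hp with ⟨rfl, hp'⟩
  have hQ : t.head? = some 'Q' := by
    rw [← head?_ch6]; exact head?_of_prefix_cons hp'
  obtain ⟨t2, rfl⟩ := eq_cons_of_head? hQ
  rw [ch6_cons 'Q' t2 (by decide) (by decide) (by decide) (by decide) (by decide)
    (by decide)] at hp'
  rcases List.cons_prefix_cons.mp hp' with ⟨-, hp''⟩
  rw [singleton_prefix, head?_ch6] at hp''
  obtain ⟨t3, rfl⟩ := eq_cons_of_head? hp''
  exact h (by simp [K7, List.cons_prefix_cons])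

lemma noPre8 (c : Char) (t : List Char) (h : ¬ K8 <+: c :: t) :
    ¬ K8 <+: c :: ch7 t := by
  intro hp
  rcases List.cons_prefix_cons.mp hp with ⟨rfl, hp'⟩
  have hW : t.head? = some 'W' := by
    rw [← head?_ch7]; exact head?_of_prefix_cons hp'
  obtain ⟨t2, rfl⟩ := eq_cons_of_head? hW
  rw [ch7_cons 'W' t2 (by decide) (by decide) (by decide) (by decide) (by decide)
    (by decide) (by decide)] at hp'
  rcases List.cons_prefix_cons.mp hp' with ⟨-, hp''⟩
  rw [singleton_prefix, head?_ch7] at hp''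
  obtain ⟨t3, rfl⟩ := eq_cons_of_head? hp''
  exact h (by simp [K8, List.cons_prefix_cons])

-- all eight passes walk over a char none of the keys matches at
lemma chain_noMatch (c : Char) (t : List Char)
    (h1 : ¬ K1 <+: c :: t) (h2 : ¬ K2 <+: c :: t) (h3 : ¬ K3 <+: c :: t)
    (h4 : ¬ K4 <+: c :: t) (h5 : ¬ K5 <+: c :: t) (h6 : ¬ K6 <+: c :: t)
    (h7 : ¬ K7 <+: c :: t) (h8 : ¬ K8 <+: c :: t) :
    chain (c :: t) = c :: chain t := by
  have e1 : ch1 (c :: t) = c :: ch1 t := by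
    rw [ch1, rep1_neg K1 V1 c t (npb h1)]; rfl
  have e2 : ch2 (c :: t) = c :: ch2 t := by
    rw [ch2, e1, rep1_neg K2 V2 c _ (npb (noPre2 c t h2))]; rfl
  have e3 : ch3 (c :: t) = c :: ch3 t := by
    rw [ch3, e2, rep1_neg K3 V3 c _ (npb (noPre3 c t h3))]; rfl
  have e4 : ch4 (c :: t) = c :: ch4 t := by
    rw [ch4, e3, rep1_neg K4 V4 c _ (npb (noPre4 c t h4))]; rfl
  have e5 : ch5 (c :: t) = c :: ch5 t := by
    rw [ch5, e4, rep1_neg K5 V5 c _ (npb (noPre5 c t h5))]; rfl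
  have e6 : ch6 (c :: t) = c :: ch6 t := by
    rw [ch6, e5, rep1_neg K6 V6 c _ (npb (noPre6 c t h6))]; rfl
  have e7 : ch7 (c :: t) = c :: ch7 t := by
    rw [ch7, e6, rep1_neg K7 V7 c _ (npb (noPre7 c t h7))]; rfl
  rw [chain, e7, rep1_neg K8 V8 c _ (npb (noPre8 c t h8))]; rfl

-- matched-key factorisations: chain (K_j ++ s') = V_j ++ chain s'
lemma rep1_self (k v : List Char) (hk : k ≠ []) (X : List Char) :
    rep1 k v (k ++ X) = v ++ rep1 k v X := by
  cases k with
  | nil => exact absurd rfl hk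
  | cons a k' =>
    rw [show (a :: k') ++ X = a :: (k' ++ X) from rfl,
      rep1_pos _ v a _ (List.isPrefixOf_iff_prefix.mpr (List.prefix_append _ _))]
    simp

lemma cOut1 (s' : List Char) : chain (K1 ++ s') = V1 ++ chain s' := by
  rw [chain, ch7, ch6, ch5, ch4, ch3, ch2, ch1,
    rep1_self K1 V1 (by decide),
    rep1_append K2 V2 (by decide) V1 (by decide),
    rep1_append K3 V3 (by decide) V1 (by decide),
    rep1_append K4 V4 (by decide) V1 (by decide),
    rep1_append K5 V5 (by decide) V1 (by decide),
    rep1_append K6 V6 (by decide) V1 (by decide),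
    rep1_append K7 V7 (by decide) V1 (by decide),
    rep1_append K8 V8 (by decide) V1 (by decide)]
  rfl

lemma cOut2 (s' : List Char) : chain (K2 ++ s') = V2 ++ chain s' := by
  rw [chain, ch7, ch6, ch5, ch4, ch3, ch2, ch1,
    rep1_append K1 V1 (by decide) K2 (by decide),
    rep1_self K2 V2 (by decide),
    rep1_append K3 V3 (by decide) V2 (by decide),
    rep1_append K4 V4 (by decide) V2 (by decide),
    rep1_append K5 V5 (by decide) V2 (by decide),
    rep1_append K6 V6 (by decide) V2 (by decide),
    rep1_append K7 V7 (by decide) V2 (by decide),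
    rep1_append K8 V8 (by decide) V2 (by decide)]
  rfl

lemma cOut3 (s' : List Char) : chain (K3 ++ s') = V3 ++ chain s' := by
  rw [chain, ch7, ch6, ch5, ch4, ch3, ch2, ch1,
    rep1_append K1 V1 (by decide) K3 (by decide),
    rep1_append K2 V2 (by decide) K3 (by decide),
    rep1_self K3 V3 (by decide),
    rep1_append K4 V4 (by decide) V3 (by decide),
    rep1_append K5 V5 (by decide) V3 (by decide),
    rep1_append K6 V6 (by decide) V3 (by decide),
    rep1_append K7 V7 (by decide) V3 (by decide),
    rep1_append K8 V8 (by decide) V3 (by decide)]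
  rfl

lemma cOut4 (s' : List Char) : chain (K4 ++ s') = V4 ++ chain s' := by
  rw [chain, ch7, ch6, ch5, ch4, ch3, ch2, ch1,
    rep1_append K1 V1 (by decide) K4 (by decide),
    rep1_append K2 V2 (by decide) K4 (by decide),
    rep1_append K3 V3 (by decide) K4 (by decide),
    rep1_self K4 V4 (by decide),
    rep1_append K5 V5 (by decide) V4 (by decide),
    rep1_append K6 V6 (by decide) V4 (by decide),
    rep1_append K7 V7 (by decide) V4 (by decide),
    rep1_append K8 V8 (by decide) V4 (by decide)]
  rfl

lemma cOut5 (s' : List Char) : chain (K5 ++ s') = V5 ++ chain s' := by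
  rw [chain, ch7, ch6, ch5, ch4, ch3, ch2, ch1,
    rep1_append K1 V1 (by decide) K5 (by decide),
    rep1_append K2 V2 (by decide) K5 (by decide),
    rep1_append K3 V3 (by decide) K5 (by decide),
    rep1_append K4 V4 (by decide) K5 (by decide),
    rep1_self K5 V5 (by decide),
    rep1_append K6 V6 (by decide) V5 (by decide),
    rep1_append K7 V7 (by decide) V5 (by decide),
    rep1_append K8 V8 (by decide) V5 (by decide)]
  rfl

lemma cOut6 (s' : List Char) : chain (K6 ++ s') = V6 ++ chain s' := by
  rw [chain, ch7, ch6, ch5, ch4, ch3, ch2, ch1,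
    rep1_append K1 V1 (by decide) K6 (by decide),
    rep1_append K2 V2 (by decide) K6 (by decide),
    rep1_append K3 V3 (by decide) K6 (by decide),
    rep1_append K4 V4 (by decide) K6 (by decide),
    rep1_append K5 V5 (by decide) K6 (by decide),
    rep1_self K6 V6 (by decide),
    rep1_append K7 V7 (by decide) V6 (by decide),
    rep1_append K8 V8 (by decide) V6 (by decide)]
  rfl

lemma cOut7 (s' : List Char) : chain (K7 ++ s') = V7 ++ chain s' := by
  rw [chain, ch7, ch6, ch5, ch4, ch3, ch2, ch1,
    rep1_append K1 V1 (by decide) K7 (by decide),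
    rep1_append K2 V2 (by decide) K7 (by decide),
    rep1_append K3 V3 (by decide) K7 (by decide),
    rep1_append K4 V4 (by decide) K7 (by decide),
    rep1_append K5 V5 (by decide) K7 (by decide),
    rep1_append K6 V6 (by decide) K7 (by decide),
    rep1_self K7 V7 (by decide),
    rep1_append K8 V8 (by decide) V7 (by decide)]
  rfl

lemma cOut8 (s' : List Char) (hQL : ¬ (['Q', 'L'] <+: s')) :
    chain (K8 ++ s') = V8 ++ chain s' := by
  have hno : ¬ K7 <+: 'S' :: ch6 s' := by
    intro hp
    rcases List.cons_prefix_cons.mp hp with ⟨-, hp'⟩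
    have hQ : s'.head? = some 'Q' := by
      rw [← head?_ch6]; exact head?_of_prefix_cons hp'
    obtain ⟨s2, rfl⟩ := eq_cons_of_head? hQ
    rw [ch6_cons 'Q' s2 (by decide) (by decide) (by decide) (by decide) (by decide)
      (by decide)] at hp'
    rcases List.cons_prefix_cons.mp hp' with ⟨-, hp''⟩
    rw [singleton_prefix, head?_ch6] at hp''
    obtain ⟨s3, rfl⟩ := eq_cons_of_head? hp''
    exact hQL (by simp [List.cons_prefix_cons])
  have hstep7 : rep1 K7 V7 (K8 ++ ch6 s') = K8 ++ rep1 K7 V7 (ch6 s') := by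
    rw [show K8 ++ ch6 s' = 'A' :: ('W' :: ('S' :: ch6 s')) from rfl,
      rep1_cons_ne K7 V7 'A' _ (by decide) (by decide),
      rep1_cons_ne K7 V7 'W' _ (by decide) (by decide),
      rep1_neg K7 V7 'S' _ (npb hno)]
    rfl
  rw [ch6, ch5, ch4, ch3, ch2, ch1] at hstep7
  rw [chain, ch7, ch6, ch5, ch4, ch3, ch2, ch1,
    rep1_append K1 V1 (by decide) K8 (by decide),
    rep1_append K2 V2 (by decide) K8 (by decide),
    rep1_append K3 V3 (by decide) K8 (by decide),
    rep1_append K4 V4 (by decide) K8 (by decide),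
    rep1_append K5 V5 (by decide) K8 (by decide),
    rep1_append K6 V6 (by decide) K8 (by decide),
    hstep7,
    rep1_self K8 V8 (by decide)]
  rfl

-- main equivalence on char lists, outside "AWSQL"
lemma chain_eq_pvScan : ∀ (n : Nat) (s : List Char), s.length ≤ n →
    ¬ (['A', 'W', 'S', 'Q', 'L'] <:+: s) → chain s = pvScan s := by
  intro n
  induction n with
  | zero =>
    intro s hl _
    have hs : s = [] := List.length_eq_zero_iff.mp (Nat.le_zero.mp hl)
    subst hs
    simp [chain, ch7, ch6, ch5, ch4, ch3, ch2, ch1, rep1_nil, pvScan]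
  | succ n ih =>
    intro s hl hinf
    cases s with
    | nil => simp [chain, ch7, ch6, ch5, ch4, ch3, ch2, ch1, rep1_nil, pvScan]
    | cons c t =>
      by_cases h1 : K1.isPrefixOf (c :: t) = true
      · obtain ⟨s', hs⟩ := List.isPrefixOf_iff_prefix.mp h1
        rw [← hs] at hl hinf ⊢
        rw [cOut1 s']
        have hpv : pvScan (K1 ++ s') = V1 ++ pvScan s' := by
          rw [show K1 ++ s' = '.' :: (' ' :: s') from rfl, pvScan]
          simp [pvTable, List.isPrefixOf]
          rfl
        rw [hpv, ih s' (by simp [K1] at hl; omega)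
          (fun hin => hinf (hin.trans (List.suffix_append K1 s').isInfix))]
      · by_cases h2 : K2.isPrefixOf (c :: t) = true
        · obtain ⟨s', hs⟩ := List.isPrefixOf_iff_prefix.mp h2
          rw [← hs] at hl hinf ⊢
          rw [cOut2 s']
          have hpv : pvScan (K2 ++ s') = V2 ++ pvScan s' := by
            rw [show K2 ++ s' = '?' :: (' ' :: s') from rfl, pvScan]
            simp [pvTable, List.isPrefixOf]
            rfl
          rw [hpv, ih s' (by simp [K2] at hl; omega)
            (fun hin => hinf (hin.trans (List.suffix_append K2 s').isInfix))]
        · by_cases h3 : K3.isPrefixOf (c :: t) = true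
          · obtain ⟨s', hs⟩ := List.isPrefixOf_iff_prefix.mp h3
            rw [← hs] at hl hinf ⊢
            rw [cOut3 s']
            have hpv : pvScan (K3 ++ s') = V3 ++ pvScan s' := by
              rw [show K3 ++ s' = ':' :: (' ' :: s') from rfl, pvScan]
              simp [pvTable, List.isPrefixOf]
              rfl
            rw [hpv, ih s' (by simp [K3] at hl; omega)
              (fun hin => hinf (hin.trans (List.suffix_append K3 s').isInfix))]
          · by_cases h4 : K4.isPrefixOf (c :: t) = true
            · obtain ⟨s', hs⟩ := List.isPrefixOf_iff_prefix.mp h4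
              rw [← hs] at hl hinf ⊢
              rw [cOut4 s']
              have hpv : pvScan (K4 ++ s') = V4 ++ pvScan s' := by
                rw [show K4 ++ s' = 'A' :: ('P' :: 'I' :: s') from rfl, pvScan]
                simp [pvTable, List.isPrefixOf]
                rfl
              rw [hpv, ih s' (by simp [K4] at hl; omega)
                (fun hin => hinf (hin.trans (List.suffix_append K4 s').isInfix))]
            · by_cases h5 : K5.isPrefixOf (c :: t) = true
              · obtain ⟨s', hs⟩ := List.isPrefixOf_iff_prefix.mp h5
                rw [← hs] at hl hinf ⊢
                rw [cOut5 s']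
                have hpv : pvScan (K5 ++ s') = V5 ++ pvScan s' := by
                  rw [show K5 ++ s' = 'R' :: ('E' :: 'S' :: 'T' :: s') from rfl, pvScan]
                  simp [pvTable, List.isPrefixOf]
                  rfl
                rw [hpv, ih s' (by simp [K5] at hl; omega)
                  (fun hin => hinf (hin.trans (List.suffix_append K5 s').isInfix))]
              · by_cases h6 : K6.isPrefixOf (c :: t) = true
                · obtain ⟨s', hs⟩ := List.isPrefixOf_iff_prefix.mp h6
                  rw [← hs] at hl hinf ⊢
                  rw [cOut6 s']
                  have hpv : pvScan (K6 ++ s') = V6 ++ pvScan s' := by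
                    rw [show K6 ++ s' = 'J' :: ('S' :: 'O' :: 'N' :: s') from rfl, pvScan]
                    simp [pvTable, List.isPrefixOf]
                    rfl
                  rw [hpv, ih s' (by simp [K6] at hl; omega)
                    (fun hin => hinf (hin.trans (List.suffix_append K6 s').isInfix))]
                · by_cases h7 : K7.isPrefixOf (c :: t) = true
                  · obtain ⟨s', hs⟩ := List.isPrefixOf_iff_prefix.mp h7
                    rw [← hs] at hl hinf ⊢
                    rw [cOut7 s']
                    have hpv : pvScan (K7 ++ s') = V7 ++ pvScan s' := by
                      rw [show K7 ++ s' = 'S' :: ('Q' :: 'L' :: s') from rfl, pvScan]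
                      simp [pvTable, List.isPrefixOf]
                      rfl
                    rw [hpv, ih s' (by simp [K7] at hl; omega)
                      (fun hin => hinf (hin.trans (List.suffix_append K7 s').isInfix))]
                  · by_cases h8 : K8.isPrefixOf (c :: t) = true
                    · obtain ⟨s', hs⟩ := List.isPrefixOf_iff_prefix.mp h8
                      rw [← hs] at hl hinf ⊢
                      have hQL : ¬ (['Q', 'L'] <+: s') := by
                        intro hq
                        obtain ⟨r, hr⟩ := hq
                        apply hinf
                        apply List.IsPrefix.isInfix
                        rw [← hr]
                        exact ⟨r, by simp [K8]⟩
                      rw [cOut8 s' hQL]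
                      have hpv : pvScan (K8 ++ s') = V8 ++ pvScan s' := by
                        rw [show K8 ++ s' = 'A' :: ('W' :: 'S' :: s') from rfl, pvScan]
                        simp [pvTable, List.isPrefixOf]
                        rfl
                      rw [hpv, ih s' (by simp [K8] at hl; omega)
                        (fun hin => hinf (hin.trans (List.suffix_append K8 s').isInfix))]
                    · have g1 := npb (fun hp => h1 (List.isPrefixOf_iff_prefix.mpr hp))
                      have g2 := npb (fun hp => h2 (List.isPrefixOf_iff_prefix.mpr hp))
                      have g3 := npb (fun hp => h3 (List.isPrefixOf_iff_prefix.mpr hp))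
                      have g4 := npb (fun hp => h4 (List.isPrefixOf_iff_prefix.mpr hp))
                      have g5 := npb (fun hp => h5 (List.isPrefixOf_iff_prefix.mpr hp))
                      have g6 := npb (fun hp => h6 (List.isPrefixOf_iff_prefix.mpr hp))
                      have g7 := npb (fun hp => h7 (List.isPrefixOf_iff_prefix.mpr hp))
                      have g8 := npb (fun hp => h8 (List.isPrefixOf_iff_prefix.mpr hp))
                      have hpv : pvScan (c :: t) = c :: pvScan t := by
                        rw [pvScan]
                        simp only [K1, K2, K3, K4, K5, K6, K7, K8] at g1 g2 g3 g4 g5 g6 g7 g8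
                        simp [pvTable, List.find?, g1, g2, g3, g4, g5, g6, g7, g8]
                      rw [hpv, chain_noMatch c t
                        (fun hp => h1 (List.isPrefixOf_iff_prefix.mpr hp))
                        (fun hp => h2 (List.isPrefixOf_iff_prefix.mpr hp))
                        (fun hp => h3 (List.isPrefixOf_iff_prefix.mpr hp))
                        (fun hp => h4 (List.isPrefixOf_iff_prefix.mpr hp))
                        (fun hp => h5 (List.isPrefixOf_iff_prefix.mpr hp))
                        (fun hp => h6 (List.isPrefixOf_iff_prefix.mpr hp))
                        (fun hp => h7 (List.isPrefixOf_iff_prefix.mpr hp))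
                        (fun hp => h8 (List.isPrefixOf_iff_prefix.mpr hp)),
                        ih t (by simp at hl; omega)
                          (fun hin => hinf (hin.trans (List.suffix_cons c t).isInfix))]

-- ===== VERDICT (by name: the statement is the Claim_ definition above) =====
theorem format_for_speech_py_spec : Claim_equal_format_for_speech_py := by
  unfold Claim_equal_format_for_speech_py
  intro text _ hpre
  unfold Spec_format_for_speech_py format_for_speech_py_alt
  apply String.toList_inj.mp
  rw [String.toList_ofList]
  have hA : format_for_speech_py text =
      PySem.Str.replace (PySem.Str.replace (PySem.Str.replace (PySem.Str.replace
        (PySem.Str.replace (PySem.Str.replace (PySem.Str.replace (PySem.Str.replace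
          text ". " ". ... ") "? " "? ... ") ": " ": ... ") "API" "A P I")
        "REST" "R E S T") "JSON" "J S O N") "SQL" "S Q L") "AWS" "A W S" := rfl
  rw [hA, PySem.Str.toList_replace, PySem.Str.toList_replace, PySem.Str.toList_replace,
    PySem.Str.toList_replace, PySem.Str.toList_replace, PySem.Str.toList_replace,
    PySem.Str.toList_replace, PySem.Str.toList_replace,
    show (". " : String).toList = K1 from rfl,
    show (". ... " : String).toList = V1 from rfl,
    show ("? " : String).toList = K2 from rfl,
    show ("? ... " : String).toList = V2 from rfl,
    show (": " : String).toList = K3 from rfl,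
    show (": ... " : String).toList = V3 from rfl,
    show ("API" : String).toList = K4 from rfl,
    show ("A P I" : String).toList = V4 from rfl,
    show ("REST" : String).toList = K5 from rfl,
    show ("R E S T" : String).toList = V5 from rfl,
    show ("JSON" : String).toList = K6 from rfl,
    show ("J S O N" : String).toList = V6 from rfl,
    show ("SQL" : String).toList = K7 from rfl,
    show ("S Q L" : String).toList = V7 from rfl,
    show ("AWS" : String).toList = K8 from rfl,
    show ("A W S" : String).toList = V8 from rfl,
    replace_eq _ K1 V1 (by decide), replace_eq _ K2 V2 (by decide),
    replace_eq _ K3 V3 (by decide), replace_eq _ K4 V4 (by decide),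
    replace_eq _ K5 V5 (by decide), replace_eq _ K6 V6 (by decide),
    replace_eq _ K7 V7 (by decide), replace_eq _ K8 V8 (by decide)]
  have hnin : ¬ (['A', 'W', 'S', 'Q', 'L'] <:+: text.toList) := by
    rw [Pre_format_for_speech_py, PySem.Str.isIn_eq] at hpre
    exact (PySem.Chars.isIn_eq_false_iff _ _).mp hpre
  have := chain_eq_pvScan text.toList.length text.toList le_rfl hnin
  rw [chain, ch7, ch6, ch5, ch4, ch3, ch2, ch1] at this
  exact this
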